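-- pv_equiv track=rewrite | github.com/pzfreo/fabprint | src/fabprint/init.py | _closest_match
-- ===== SOURCE A (Python) =====
-- def _closest_match(name: str, candidates: list[str]) -> str | None:
--     """Return the closest matching string from candidates, or None."""
--     if not candidates:
--         return None
--     name_lower = name.lower()
--     # Try substring match first
--     for c in candidates:
--         if name_lower in c.lower() or c.lower() in name_lower:
--             return c
--     # Simple prefix match
--     for c in candidates:
--         if c.lower().startswith(name_lower[:8]):
--             return c
--     return None
-- ===== SOURCE B (Python) =====
-- def _closest_match(name: str, candidates: list[str]) -> str | None:
--     """Single pass: return first substring match immediately; otherwise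
--     remember the first prefix match and return it after the loop."""
--     name_lower = name.lower()
--     prefix = name_lower[:8]
--     best_prefix = None
--     for c in candidates:
--         cl = c.lower()
--         if name_lower in cl or cl in name_lower:
--             return c
--         if best_prefix is None and cl.startswith(prefix):
--             best_prefix = c
--     return best_prefix
-- ===== Notes on version B (the rewrite author's own statement) =====
-- stated objective: alternative
-- what changed: Replaced A's two sequential scans (substring pass, then prefix pass) by one single pass that returns a substring match immediately and carries the first prefix match in an accumulator, lowercasing each candidate once per pass instead of up to three times.
import Mathlib
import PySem

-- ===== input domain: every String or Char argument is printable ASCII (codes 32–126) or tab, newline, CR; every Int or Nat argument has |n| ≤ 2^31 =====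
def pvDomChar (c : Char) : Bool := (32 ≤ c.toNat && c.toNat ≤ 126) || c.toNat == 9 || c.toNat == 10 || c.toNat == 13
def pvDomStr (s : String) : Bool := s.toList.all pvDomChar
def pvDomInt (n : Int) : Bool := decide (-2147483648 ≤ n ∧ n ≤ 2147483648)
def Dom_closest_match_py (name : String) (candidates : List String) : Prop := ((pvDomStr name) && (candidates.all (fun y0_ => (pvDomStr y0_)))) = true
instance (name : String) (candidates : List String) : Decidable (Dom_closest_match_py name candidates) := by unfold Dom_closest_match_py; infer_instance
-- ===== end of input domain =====

-- B fuses A's two scans into one pass carrying the first pfx match in an accumulator (alternative decomposition; same result).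


-- ===== PORT A =====
-- literal port of A: early-return 'for' loops become List.find?, in A's order
def closest_match_py (name : String) (candidates : List String) : Option String :=
  if candidates = [] then none
  else
    let name_lower := PySem.Str.lower name
    match candidates.find? (fun c =>
        PySem.Str.isIn name_lower (PySem.Str.lower c) || PySem.Str.isIn (PySem.Str.lower c) name_lower) with
    | some c => some c
    | none =>
      match candidates.find? (fun c =>
          PySem.Str.startswith (PySem.Str.lower c) (PySem.Str.slice name_lower none (some 8))) with
      | some c => some c
      | none => none

-- ===== PORT B =====
-- Source B's single loop with the best_prefix accumulator
def closestAltLoop (name_lower pfx : String) (best_prefix : Option String) :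
    List String → Option String
  | [] => best_prefix
  | c :: rest =>
    let cl := PySem.Str.lower c
    if PySem.Str.isIn name_lower cl || PySem.Str.isIn cl name_lower then some c
    else
      closestAltLoop name_lower pfx
        (if best_prefix.isNone && PySem.Str.startswith cl pfx then some c else best_prefix) rest

def closest_match_py_alt (name : String) (candidates : List String) : Option String :=
  let name_lower := PySem.Str.lower name
  closestAltLoop name_lower (PySem.Str.slice name_lower none (some 8)) none candidates

-- ===== PRECONDITION & SPEC =====
def Spec_closest_match_py (name : String) (candidates : List String) (out : Option String) : Prop := out = closest_match_py_alt name candidates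
instance (name : String) (candidates : List String) (out : Option String) : Decidable (Spec_closest_match_py name candidates out) := by unfold Spec_closest_match_py; infer_instance

-- ===== CLAIM (what is proved, stated in full; the proofs are below) =====
def Claim_equal_closest_match_py : Prop := ∀ (name : String) (candidates : List String), Dom_closest_match_py name candidates → Spec_closest_match_py name candidates (closest_match_py name candidates)

-- ===== LEMMAS AND PROOFS =====
-- B's loop computed in A's shape: first substring match if any, else the carried best, else first pfx match
theorem closestAltLoop_eq (nl pf : String) (l : List String) (best : Option String) :
    closestAltLoop nl pf best l =
      match l.find? (fun c =>
          PySem.Str.isIn nl (PySem.Str.lower c) || PySem.Str.isIn (PySem.Str.lower c) nl) with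
      | some c => some c
      | none =>
        match best with
        | some b => some b
        | none => l.find? (fun c => PySem.Str.startswith (PySem.Str.lower c) pf) := by
  induction l generalizing best with
  | nil => cases best <;> rfl
  | cons c rest ih =>
    simp only [closestAltLoop, List.find?]
    by_cases hs : (PySem.Str.isIn nl (PySem.Str.lower c) || PySem.Str.isIn (PySem.Str.lower c) nl) = true
    · rw [if_pos hs, hs]
    · rw [if_neg hs, eq_false_of_ne_true hs]
      cases best with
      | some b =>
        simp only [Option.isNone_some, Bool.false_and, Bool.false_eq_true, if_false]
        rw [ih]
      | none =>
        simp only [Option.isNone_none, Bool.true_and]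
        by_cases hp : PySem.Str.startswith (PySem.Str.lower c) pf = true
        · rw [if_pos hp, hp, ih]
        · rw [if_neg hp, eq_false_of_ne_true hp]
          rw [ih]

-- ===== VERDICT (by name: the statement is the Claim_ definition above) =====
theorem closest_match_py_spec : Claim_equal_closest_match_py := by
  intro name candidates _
  unfold Spec_closest_match_py closest_match_py closest_match_py_alt
  rw [closestAltLoop_eq (PySem.Str.lower name)
    (PySem.Str.slice (PySem.Str.lower name) none (some 8)) candidates none]
  cases candidates with
  | nil => rfl
  | cons c rest =>
    rw [if_neg (List.cons_ne_nil c rest)]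
    cases h1 : (c :: rest).find? (fun x =>
        PySem.Str.isIn (PySem.Str.lower name) (PySem.Str.lower x) ||
        PySem.Str.isIn (PySem.Str.lower x) (PySem.Str.lower name)) with
    | some a => simp only [h1]
    | none =>
      cases h2 : (c :: rest).find? (fun x =>
          PySem.Str.startswith (PySem.Str.lower x)
            (PySem.Str.slice (PySem.Str.lower name) none (some 8))) <;> simp only [h1, h2]
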